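-- pv_equiv track=rewrite | github.com/Deniss3232/proyecto-2-teoria | proyecto-2-teoria/proyecto-2-teoria/cyk_engine.py | remove_unreachable
-- ===== SOURCE A (Python) =====
-- def remove_unreachable(start, rules):
--     reach = {start}; changed = True
--     while changed:
--         changed = False
--         for A in list(reach):
--             for rhs in rules.get(A, set()):
--                 for X in rhs:
--                     if X in rules and X not in reach:
--                         reach.add(X); changed = True
--     return {A: set(Bs) for A, Bs in rules.items() if A in reach}
-- ===== SOURCE B (Python) =====
-- def remove_unreachable(start, rules):
--     # Precompute the dependency graph once, then breadth-first search by levels.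
--     adj = {A: [X for rhs in Bs for X in rhs if X in rules] for A, Bs in rules.items()}
--     reach = {start}
--     frontier = [start]
--     while frontier:
--         nxt = []
--         for A in frontier:
--             for X in adj.get(A, []):
--                 if X not in reach:
--                     reach.add(X)
--                     nxt.append(X)
--         frontier = nxt
--     return {A: set(Bs) for A, Bs in rules.items() if A in reach}
-- ===== Notes on version B (the rewrite author's own statement) =====
-- stated objective: alternative
-- what changed: Replaced A's repeat-until-no-change saturation passes over the whole reached set with a precomputed adjacency map plus a level-by-level BFS whose frontier holds only the newly reached symbols; worst-case work drops from quadratic passes to one scan per symbol, though the precompute makes it no faster on shallow grammars.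
import Mathlib
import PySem

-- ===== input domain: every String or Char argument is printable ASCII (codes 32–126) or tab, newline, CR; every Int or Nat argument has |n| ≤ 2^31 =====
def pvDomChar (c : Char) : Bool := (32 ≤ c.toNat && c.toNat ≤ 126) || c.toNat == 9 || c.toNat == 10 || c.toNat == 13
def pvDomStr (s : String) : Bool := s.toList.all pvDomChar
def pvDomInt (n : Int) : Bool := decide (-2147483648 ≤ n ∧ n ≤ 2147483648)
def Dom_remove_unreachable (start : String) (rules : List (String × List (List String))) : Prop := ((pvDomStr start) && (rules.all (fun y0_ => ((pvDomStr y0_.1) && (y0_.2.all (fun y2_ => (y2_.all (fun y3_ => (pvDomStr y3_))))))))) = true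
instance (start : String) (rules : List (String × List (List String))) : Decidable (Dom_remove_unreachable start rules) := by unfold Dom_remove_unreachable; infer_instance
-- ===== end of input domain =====

-- B replaces A's repeat-until-no-change saturation passes with a precomputed adjacency map
-- and a level-by-level BFS whose frontier holds only newly reached symbols; same returned grammar.


-- ===== PORT A =====
-- A: reach = {start}; repeat full passes over a snapshot of reach, adding every key symbol
-- occurring in a rhs of a reached symbol, until a pass changes nothing.
-- The while-loop is ported with a fuel bound (d.size + 2) that provably suffices
-- (each repeated pass strictly grows reach, which is bounded by the key count + 1).
def pvStepA (d : PySem.Dict String (List (List String))) (st : PySem.Set String × Bool)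
    (X : String) : PySem.Set String × Bool :=
  if d.contains X && !(PySem.Set.contains st.1 X) then (PySem.Set.add st.1 X, true) else st

def pvPassA (d : PySem.Dict String (List (List String))) (reach : PySem.Set String) :
    PySem.Set String × Bool :=
  reach.foldl (fun st A => (d.getD A []).foldl (fun st rhs => rhs.foldl (pvStepA d) st) st)
    (reach, false)

def pvLoopA (d : PySem.Dict String (List (List String))) :
    Nat → PySem.Set String → PySem.Set String
  | 0, reach => reach
  | n + 1, reach =>
    let p := pvPassA d reach
    if p.2 then pvLoopA d n p.1 else p.1

def remove_unreachable (start : String) (rules : List (String × List (List String))) :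
    List (String × List (List String)) :=
  let d := PySem.Dict.ofList rules
  let reach := pvLoopA d (d.size + 2) (PySem.Set.add PySem.Set.empty start)
  (d.items.filter (fun p => PySem.Set.contains reach p.1)).map
    (fun p => (p.1, PySem.Set.ofList p.2))

-- ===== PORT B =====
-- B: dict comprehension building the adjacency map (flattened rhs symbols that are keys),
-- then a breadth-first search by levels: frontier = the symbols reached in the last round.
-- The while-loop is ported with a fuel bound (d.size + 2) that provably suffices.
def pvAdj (d : PySem.Dict String (List (List String))) : PySem.Dict String (List String) :=
  PySem.Dict.ofList (d.items.map (fun p =>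
    (p.1, p.2.flatMap (fun rhs => rhs.filter (fun x => d.contains x)))))

def pvScan (st : PySem.Set String × List String) (X : String) :
    PySem.Set String × List String :=
  if PySem.Set.contains st.1 X then st else (PySem.Set.add st.1 X, st.2 ++ [X])

def pvRound (adj : PySem.Dict String (List String)) (frontier : List String)
    (reach : PySem.Set String) : PySem.Set String × List String :=
  frontier.foldl (fun st A => (adj.getD A []).foldl pvScan st) (reach, [])

def pvBfs (adj : PySem.Dict String (List String)) :
    Nat → List String → PySem.Set String → PySem.Set String
  | 0, _, reach => reach
  | _ + 1, [], reach => reach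
  | n + 1, A :: fr, reach =>
    let p := pvRound adj (A :: fr) reach
    pvBfs adj n p.2 p.1

def remove_unreachable_alt (start : String) (rules : List (String × List (List String))) :
    List (String × List (List String)) :=
  let d := PySem.Dict.ofList rules
  let reach := pvBfs (pvAdj d) (d.size + 2) [start] (PySem.Set.add PySem.Set.empty start)
  (d.items.filter (fun p => PySem.Set.contains reach p.1)).map
    (fun p => (p.1, PySem.Set.ofList p.2))

-- ===== PRECONDITION & SPEC =====
def Spec_remove_unreachable (start : String) (rules : List (String × List (List String))) (out : List (String × List (List String))) : Prop := out = remove_unreachable_alt start rules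
instance (start : String) (rules : List (String × List (List String))) (out : List (String × List (List String))) : Decidable (Spec_remove_unreachable start rules out) := by unfold Spec_remove_unreachable; infer_instance

-- ===== CLAIM (what is proved, stated in full; the proofs are below) =====
def Claim_equal_remove_unreachable : Prop := ∀ (start : String) (rules : List (String × List (List String))), Dom_remove_unreachable start rules → Spec_remove_unreachable start rules (remove_unreachable start rules)

-- ===== LEMMAS AND PROOFS =====

-- One grammar edge: from a reached symbol `a` to a key symbol `x` occurring in some rhs of `a`.
def pvEdge (d : PySem.Dict String (List (List String))) (a x : String) : Prop :=
  d.contains x = true ∧ ∃ rhs ∈ d.getD a [], x ∈ rhs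

def pvReach (d : PySem.Dict String (List (List String))) (start x : String) : Prop :=
  Relation.ReflTransGen (pvEdge d) start x

-- A set of symbols that is exactly the reachable set, up to membership.
def pvGood (d : PySem.Dict String (List (List String))) (start : String)
    (R : List String) : Prop :=
  start ∈ R ∧ (∀ x ∈ R, pvReach d start x) ∧ (∀ a ∈ R, ∀ x, pvEdge d a x → x ∈ R)

theorem pvGood_mem_iff (d : PySem.Dict String (List (List String))) (start : String)
    (R R' : List String) (h : pvGood d start R) (h' : pvGood d start R') (x : String) :
    x ∈ R ↔ x ∈ R' := by
  have key : ∀ T : List String, pvGood d start T → ∀ y, pvReach d start y → y ∈ T := by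
    intro T hT y hr
    induction hr with
    | refl => exact hT.1
    | tail _ he ih => exact hT.2.2 _ ih _ he
  exact ⟨fun hx => key R' h' x (h.2.1 x hx), fun hx => key R h x (h'.2.1 x hx)⟩

-- Evolution relation for A's pass: everything a chain of pvStepA steps preserves.
def pvEvA (d : PySem.Dict String (List (List String))) (W : String → Prop)
    (st st' : PySem.Set String × Bool) : Prop :=
  st.1 ⊆ st'.1 ∧ st.1.length ≤ st'.1.length ∧ (st.1.Nodup → st'.1.Nodup) ∧
  (st'.2 = false → st' = st) ∧
  (st'.2 = true → st.2 = true ∨ st.1.length < st'.1.length) ∧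
  (∀ y ∈ st'.1, y ∈ st.1 ∨ (d.contains y = true ∧ W y))

theorem pvEvA_refl (d : PySem.Dict String (List (List String))) (W : String → Prop)
    (st : PySem.Set String × Bool) : pvEvA d W st st := by
  exact ⟨fun _ h => h, le_refl _, id, fun _ => rfl, fun h => Or.inl h, fun y hy => Or.inl hy⟩

theorem pvEvA_trans (d : PySem.Dict String (List (List String))) (W : String → Prop)
    (st st1 st2 : PySem.Set String × Bool) (h1 : pvEvA d W st st1) (h2 : pvEvA d W st1 st2) :
    pvEvA d W st st2 := by
  obtain ⟨m1, l1, n1, f1, g1, s1⟩ := h1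
  obtain ⟨m2, l2, n2, f2, g2, s2⟩ := h2
  refine ⟨fun y hy => m2 (m1 hy), le_trans l1 l2, fun h => n2 (n1 h), ?_, ?_, ?_⟩
  · intro h; have e2 := f2 h; rw [e2] at h ⊢; exact f1 h
  · intro h
    rcases g2 h with h' | h'
    · rcases g1 h' with h'' | h''
      · exact Or.inl h''
      · exact Or.inr (lt_of_lt_of_le h'' l2)
    · exact Or.inr (lt_of_le_of_lt l1 h')
  · intro y hy
    rcases s2 y hy with h | h
    · exact s1 y h
    · exact Or.inr h

theorem pvStepA_cases (d : PySem.Dict String (List (List String)))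
    (st : PySem.Set String × Bool) (X : String) :
    pvStepA d st X = st ∨
      (d.contains X = true ∧ X ∉ st.1 ∧ pvStepA d st X = (st.1 ++ [X], true)) := by
  unfold pvStepA
  split_ifs with h
  · right
    rw [Bool.and_eq_true, Bool.not_eq_true'] at h
    have hx : X ∉ st.1 := by
      intro hx
      rw [(PySem.Set.contains_iff st.1 X).2 hx] at h
      exact absurd h.2 (by simp)
    exact ⟨h.1, hx, by rw [PySem.Set.add_of_not_mem hx]⟩
  · exact Or.inl rfl

theorem pvEvA_step (d : PySem.Dict String (List (List String))) (W : String → Prop)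
    (st : PySem.Set String × Bool) (X : String) (hW : W X) :
    pvEvA d W st (pvStepA d st X) := by
  rcases pvStepA_cases d st X with h | ⟨hc, hm, h⟩
  · rw [h]; exact pvEvA_refl d W st
  · rw [h]
    refine ⟨fun y hy => List.mem_append_left _ hy, by simp, ?_, by simp, ?_, ?_⟩
    · intro hn
      rw [List.nodup_append]
      refine ⟨hn, List.nodup_singleton X, ?_⟩
      intro a ha b hb h
      subst h
      rw [List.mem_singleton.1 hb] at ha
      exact hm ha
    · intro _; right; simp
    · intro y hy
      rcases List.mem_append.1 hy with h' | h'
      · exact Or.inl h'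
      · simp only [List.mem_singleton] at h'; subst h'; exact Or.inr ⟨hc, hW⟩

theorem pvEvA_fold1 (d : PySem.Dict String (List (List String))) (W : String → Prop)
    (rhs : List String) (st : PySem.Set String × Bool) (hW : ∀ x ∈ rhs, W x) :
    pvEvA d W st (rhs.foldl (pvStepA d) st) := by
  induction rhs generalizing st with
  | nil => exact pvEvA_refl d W st
  | cons r rs ih =>
    exact pvEvA_trans d W _ _ _ (pvEvA_step d W st r (hW r (by simp)))
      (ih _ (fun x hx => hW x (by simp [hx])))

theorem pvEvA_fold2 (d : PySem.Dict String (List (List String))) (W : String → Prop)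
    (rhss : List (List String)) (st : PySem.Set String × Bool)
    (hW : ∀ rhs ∈ rhss, ∀ x ∈ rhs, W x) :
    pvEvA d W st (rhss.foldl (fun st rhs => rhs.foldl (pvStepA d) st) st) := by
  induction rhss generalizing st with
  | nil => exact pvEvA_refl d W st
  | cons r rs ih =>
    exact pvEvA_trans d W _ _ _ (pvEvA_fold1 d W r st (hW r (by simp)))
      (ih _ (fun rhs h x hx => hW rhs (by simp [h]) x hx))

theorem pvEvA_outer (d : PySem.Dict String (List (List String))) (W : String → Prop)
    (l : List String) (st : PySem.Set String × Bool)
    (hW : ∀ a ∈ l, ∀ rhs ∈ d.getD a [], ∀ x ∈ rhs, W x) :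
    pvEvA d W st
      (l.foldl (fun st A => (d.getD A []).foldl (fun st rhs => rhs.foldl (pvStepA d) st) st) st) := by
  induction l generalizing st with
  | nil => exact pvEvA_refl d W st
  | cons a l ih =>
    exact pvEvA_trans d W _ _ _
      (pvEvA_fold2 d W _ st (hW a (by simp)))
      (ih _ (fun b hb => hW b (by simp [hb])))

theorem pvEvA_pass (d : PySem.Dict String (List (List String))) (reach : PySem.Set String) :
    pvEvA d (fun y => ∃ a ∈ reach, ∃ rhs ∈ d.getD a [], y ∈ rhs) (reach, false)
      (pvPassA d reach) :=
  pvEvA_outer d _ reach (reach, false) (fun a ha rhs hr _ hx => ⟨a, ha, rhs, hr, hx⟩)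

theorem pvStepA_self (d : PySem.Dict String (List (List String)))
    (st : PySem.Set String × Bool) (X : String) (hc : d.contains X = true) :
    X ∈ (pvStepA d st X).1 := by
  unfold pvStepA
  split_ifs with h
  · simp [PySem.Set.mem_add]
  · rw [hc, Bool.true_and, Bool.not_eq_true', Bool.not_eq_false] at h
    exact (PySem.Set.contains_iff st.1 X).1 h

theorem pvFoldA1_complete (d : PySem.Dict String (List (List String))) (rhs : List String)
    (st : PySem.Set String × Bool) (x : String) (hx : x ∈ rhs) (hc : d.contains x = true) :
    x ∈ (rhs.foldl (pvStepA d) st).1 := by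
  induction rhs generalizing st with
  | nil => cases hx
  | cons r rs ih =>
    rcases List.mem_cons.1 hx with h | h
    · subst h
      exact (pvEvA_fold1 d (fun _ => True) rs _ (fun _ _ => trivial)).1
        (pvStepA_self d st x hc)
    · exact ih _ h

theorem pvFoldA2_complete (d : PySem.Dict String (List (List String)))
    (rhss : List (List String)) (st : PySem.Set String × Bool) (rhs : List String) (x : String)
    (hr : rhs ∈ rhss) (hx : x ∈ rhs) (hc : d.contains x = true) :
    x ∈ (rhss.foldl (fun st rhs => rhs.foldl (pvStepA d) st) st).1 := by
  induction rhss generalizing st with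
  | nil => cases hr
  | cons r rs ih =>
    rcases List.mem_cons.1 hr with h | h
    · subst h
      exact (pvEvA_fold2 d (fun _ => True) rs _ (fun _ _ _ _ => trivial)).1
        (pvFoldA1_complete d rhs st x hx hc)
    · exact ih _ h

theorem pvPassA_complete (d : PySem.Dict String (List (List String))) (reach : PySem.Set String)
    (a x : String) (ha : a ∈ reach) (he : pvEdge d a x) :
    x ∈ (pvPassA d reach).1 := by
  obtain ⟨hc, rhs, hr, hx⟩ := he
  unfold pvPassA
  have main : ∀ (l : List String) (st : PySem.Set String × Bool), a ∈ l →
      x ∈ (l.foldl (fun st A => (d.getD A []).foldl (fun st rhs => rhs.foldl (pvStepA d) st) st) st).1 := by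
    intro l
    induction l with
    | nil => intro _ h; cases h
    | cons b l ih =>
      intro st hb
      rcases List.mem_cons.1 hb with h | h
      · subst h
        exact (pvEvA_outer d (fun _ => True) l _ (fun _ _ _ _ _ _ => trivial)).1
          (pvFoldA2_complete d _ st rhs x hr hx hc)
      · exact ih _ h
  exact main reach (reach, false) ha

theorem pvKeys_length (d : PySem.Dict String (List (List String))) :
    d.keys.length = d.size := by
  simp [PySem.Dict.keys, PySem.Dict.size]

theorem pvBound (d : PySem.Dict String (List (List String))) (start : String)
    (reach : PySem.Set String) (hnd : reach.Nodup)
    (hsub : ∀ x ∈ reach, x = start ∨ d.contains x = true) :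
    reach.length ≤ d.size + 1 := by
  have hs : reach ⊆ start :: d.keys := by
    intro x hx
    rcases hsub x hx with h | h
    · exact h ▸ List.mem_cons_self
    · exact List.mem_cons_of_mem _ ((PySem.Dict.contains_iff_mem_keys d x).1 h)
  have := (List.subperm_of_subset hnd hs).length_le
  simpa [pvKeys_length] using this

theorem pvLoopA_good (d : PySem.Dict String (List (List String))) (start : String) :
    ∀ (n : Nat) (reach : PySem.Set String), reach.Nodup → start ∈ reach →
    (∀ x ∈ reach, pvReach d start x) →
    (∀ x ∈ reach, x = start ∨ d.contains x = true) →
    d.size + 2 ≤ n + reach.length →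
    pvGood d start (pvLoopA d n reach) := by
  intro n
  induction n with
  | zero =>
    intro reach hnd hst _ hsub hfuel
    have := pvBound d start reach hnd hsub
    omega
  | succ n ih =>
    intro reach hnd hst hsound hsub hfuel
    have hev := pvEvA_pass d reach
    simp only [pvLoopA]
    rcases hp : (pvPassA d reach).2 with _ | _
    · rw [if_neg (by simp)]
      have heq : pvPassA d reach = (reach, false) := hev.2.2.2.1 hp
      rw [heq]
      refine ⟨hst, hsound, ?_⟩
      intro a ha x he
      have := pvPassA_complete d reach a x ha he
      rw [heq] at this
      exact this
    · rw [if_pos rfl]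
      have hgrow : reach.length < (pvPassA d reach).1.length := by
        rcases hev.2.2.2.2.1 hp with h | h
        · cases h
        · exact h
      apply ih
      · exact hev.2.2.1 hnd
      · exact hev.1 hst
      · intro y hy
        rcases hev.2.2.2.2.2 y hy with h | ⟨hc, a, ha, rhs, hr, hyy⟩
        · exact hsound y h
        · exact Relation.ReflTransGen.tail (hsound a ha) ⟨hc, rhs, hr, hyy⟩
      · intro y hy
        rcases hev.2.2.2.2.2 y hy with h | ⟨hc, _⟩
        · exact hsub y h
        · exact Or.inr hc
      · omega

-- B-side: the adjacency map looks up exactly the edges of the grammar graph.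
theorem pvAdj_items (d : PySem.Dict String (List (List String))) (hnd : d.keys.Nodup) :
    (pvAdj d).items = d.items.map (fun p =>
      (p.1, p.2.flatMap (fun rhs => rhs.filter (fun x => d.contains x)))) := by
  have := PySem.Dict.items_foldl_insert_fresh
    (l := d.items.map (fun p =>
      (p.1, p.2.flatMap (fun rhs => rhs.filter (fun x => d.contains x)))))
    (d := PySem.Dict.empty) (k := Prod.fst) (v := Prod.snd) ?_ ?_
  · simpa [pvAdj, PySem.Dict.ofList] using this
  · intro a _; simp
  · simp only [List.map_map]
    simpa [Function.comp, PySem.Dict.keys] using hnd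

theorem pvAdj_mem (d : PySem.Dict String (List (List String))) (hnd : d.keys.Nodup)
    (A x : String) : x ∈ (pvAdj d).getD A [] ↔ pvEdge d A x := by
  have hitems := pvAdj_items d hnd
  have hkeys : (pvAdj d).keys = d.keys := by
    simp [PySem.Dict.keys, hitems, List.map_map, Function.comp]
  by_cases hc : d.contains A = true
  · obtain ⟨bs, hp⟩ : ∃ v, (A, v) ∈ d.items := by
      simpa [PySem.Dict.keys] using (PySem.Dict.contains_iff_mem_keys d A).1 hc
    have hgd : d.getD A [] = bs := PySem.Dict.getD_of_mem_items _ hp hnd _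
    have hmem : (A, bs.flatMap (fun rhs => rhs.filter (fun x => d.contains x)))
        ∈ (pvAdj d).items := by
      rw [hitems]
      exact List.mem_map.2 ⟨(A, bs), hp, rfl⟩
    have hgd' := PySem.Dict.getD_of_mem_items _ hmem (by rw [hkeys]; exact hnd) []
    rw [hgd']
    simp only [pvEdge, hgd, List.mem_flatMap, List.mem_filter]
    tauto
  · have hno : (pvAdj d).contains A = false := by
      rw [Bool.eq_false_iff]
      intro h
      exact hc ((PySem.Dict.contains_iff_mem_keys d A).2
        (by rw [← hkeys]; exact (PySem.Dict.contains_iff_mem_keys _ A).1 h))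
    rw [PySem.Dict.getD_of_not_contains _ _ hno]
    have : d.getD A [] = [] := PySem.Dict.getD_of_not_contains _ _ (Bool.eq_false_iff.2 hc)
    simp [pvEdge, this]

-- Evolution relation for one BFS round: everything a chain of pvScan steps preserves.
def pvEvC (W : String → Prop) (st st' : PySem.Set String × List String) : Prop :=
  st.1 ⊆ st'.1 ∧ (st.1.Nodup → st'.1.Nodup) ∧ (∀ y ∈ st.2, y ∈ st'.2) ∧
  st'.1.length + st.2.length = st.1.length + st'.2.length ∧
  (∀ y ∈ st'.2, y ∈ st.2 ∨ y ∈ st'.1) ∧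
  (∀ y ∈ st'.1, y ∈ st.1 ∨ y ∈ st'.2) ∧
  (∀ y ∈ st'.1, y ∈ st.1 ∨ W y)

theorem pvEvC_refl (W : String → Prop) (st : PySem.Set String × List String) :
    pvEvC W st st :=
  ⟨fun _ h => h, id, fun _ h => h, rfl, fun _ hy => Or.inl hy, fun _ hy => Or.inl hy,
    fun _ hy => Or.inl hy⟩

theorem pvEvC_trans (W : String → Prop) (st st1 st2 : PySem.Set String × List String)
    (h1 : pvEvC W st st1) (h2 : pvEvC W st1 st2) : pvEvC W st st2 := by
  obtain ⟨m1, n1, k1, c1, p1, q1, s1⟩ := h1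
  obtain ⟨m2, n2, k2, c2, p2, q2, s2⟩ := h2
  refine ⟨fun y hy => m2 (m1 hy), fun h => n2 (n1 h), fun y hy => k2 y (k1 y hy),
    by omega, ?_, ?_, ?_⟩
  · intro y hy
    rcases p2 y hy with h | h
    · rcases p1 y h with h' | h'
      · exact Or.inl h'
      · exact Or.inr (m2 h')
    · exact Or.inr h
  · intro y hy
    rcases q2 y hy with h | h
    · rcases q1 y h with h' | h'
      · exact Or.inl h'
      · exact Or.inr (k2 y h')
    · exact Or.inr h
  · intro y hy
    rcases s2 y hy with h | h
    · exact s1 y h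
    · exact Or.inr h

theorem pvScan_cases (st : PySem.Set String × List String) (X : String) :
    pvScan st X = st ∨
      (X ∉ st.1 ∧ pvScan st X = (st.1 ++ [X], st.2 ++ [X])) := by
  unfold pvScan
  split_ifs with h
  · exact Or.inl rfl
  · right
    rw [Bool.not_eq_true] at h
    have hx : X ∉ st.1 := by
      intro hx
      rw [(PySem.Set.contains_iff st.1 X).2 hx] at h
      cases h
    exact ⟨hx, by rw [PySem.Set.add_of_not_mem hx]⟩

theorem pvEvC_step (W : String → Prop) (st : PySem.Set String × List String)
    (X : String) (hW : W X) : pvEvC W st (pvScan st X) := by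
  rcases pvScan_cases st X with h | ⟨hm, h⟩
  · rw [h]; exact pvEvC_refl W st
  · rw [h]
    refine ⟨fun y hy => List.mem_append_left _ hy, ?_,
      fun y hy => List.mem_append_left _ hy,
      by simp only [List.length_append, List.length_cons, List.length_nil]; omega,
      ?_, ?_, ?_⟩
    · intro hn
      rw [List.nodup_append]
      refine ⟨hn, List.nodup_singleton X, ?_⟩
      intro a ha b hb hab
      subst hab
      rw [List.mem_singleton.1 hb] at ha
      exact hm ha
    · intro y hy
      rcases List.mem_append.1 hy with h' | h'
      · exact Or.inl h'
      · rw [List.mem_singleton.1 h']; exact Or.inr (by simp)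
    · intro y hy
      rcases List.mem_append.1 hy with h' | h'
      · exact Or.inl h'
      · rw [List.mem_singleton.1 h']; exact Or.inr (by simp)
    · intro y hy
      rcases List.mem_append.1 hy with h' | h'
      · exact Or.inl h'
      · rw [List.mem_singleton.1 h']; exact Or.inr hW

theorem pvEvC_fold (W : String → Prop) (L : List String)
    (st : PySem.Set String × List String) (hW : ∀ x ∈ L, W x) :
    pvEvC W st (L.foldl pvScan st) := by
  induction L generalizing st with
  | nil => exact pvEvC_refl W st
  | cons r rs ih =>
    exact pvEvC_trans W _ _ _ (pvEvC_step W st r (hW r (by simp)))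
      (ih _ (fun x hx => hW x (by simp [hx])))

theorem pvEvC_outer (W : String → Prop) (adj : PySem.Dict String (List String))
    (l : List String) (st : PySem.Set String × List String)
    (hW : ∀ a ∈ l, ∀ x ∈ adj.getD a [], W x) :
    pvEvC W st (l.foldl (fun st A => (adj.getD A []).foldl pvScan st) st) := by
  induction l generalizing st with
  | nil => exact pvEvC_refl W st
  | cons a l ih =>
    exact pvEvC_trans W _ _ _
      (pvEvC_fold W _ st (hW a (by simp)))
      (ih _ (fun b hb => hW b (by simp [hb])))

theorem pvEvC_round (adj : PySem.Dict String (List String)) (frontier : List String)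
    (reach : PySem.Set String) :
    pvEvC (fun y => ∃ a ∈ frontier, y ∈ adj.getD a []) (reach, [])
      (pvRound adj frontier reach) :=
  pvEvC_outer _ adj frontier (reach, []) (fun a ha _ hx => ⟨a, ha, hx⟩)

theorem pvScan_self (st : PySem.Set String × List String) (X : String) :
    X ∈ (pvScan st X).1 := by
  unfold pvScan
  split_ifs with h
  · exact (PySem.Set.contains_iff st.1 X).1 h
  · simp [PySem.Set.mem_add]

theorem pvFoldC_complete (L : List String) (st : PySem.Set String × List String)
    (x : String) (hx : x ∈ L) : x ∈ (L.foldl pvScan st).1 := by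
  induction L generalizing st with
  | nil => cases hx
  | cons r rs ih =>
    rcases List.mem_cons.1 hx with h | h
    · subst h
      exact (pvEvC_fold (fun _ => True) rs _ (fun _ _ => trivial)).1 (pvScan_self st x)
    · exact ih _ h

theorem pvRound_complete (adj : PySem.Dict String (List String)) (frontier : List String)
    (reach : PySem.Set String) (a x : String) (ha : a ∈ frontier)
    (hx : x ∈ adj.getD a []) : x ∈ (pvRound adj frontier reach).1 := by
  unfold pvRound
  have main : ∀ (l : List String) (st : PySem.Set String × List String), a ∈ l →
      x ∈ (l.foldl (fun st A => (adj.getD A []).foldl pvScan st) st).1 := by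
    intro l
    induction l with
    | nil => intro _ h; cases h
    | cons b l ih =>
      intro st hb
      rcases List.mem_cons.1 hb with h | h
      · subst h
        exact (pvEvC_outer (fun _ => True) adj l _ (fun _ _ _ _ => trivial)).1
          (pvFoldC_complete _ st x hx)
      · exact ih _ h
  exact main frontier (reach, []) ha

theorem pvBfs_good (d : PySem.Dict String (List (List String))) (start : String)
    (hnd : d.keys.Nodup) :
    ∀ (n : Nat) (frontier : List String) (reach : PySem.Set String), reach.Nodup →
    start ∈ reach → (∀ x ∈ reach, pvReach d start x) →
    (∀ x ∈ reach, x = start ∨ d.contains x = true) →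
    (∀ y ∈ frontier, y ∈ reach) →
    (∀ a ∈ reach, a ∈ frontier ∨ ∀ x, pvEdge d a x → x ∈ reach) →
    (frontier ≠ [] → d.size + 3 ≤ n + reach.length) →
    pvGood d start (pvBfs (pvAdj d) n frontier reach) := by
  intro n
  induction n with
  | zero =>
    intro frontier reach hrnd hst hsound hsub hfr hproc hfuel
    match frontier with
    | [] =>
      refine ⟨hst, hsound, ?_⟩
      intro a ha x he
      rcases hproc a ha with h | h
      · cases h
      · exact h x he
    | A :: fr =>
      exfalso
      have h1 := pvBound d start reach hrnd hsub
      have h2 := hfuel (by simp)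
      omega
  | succ n ih =>
    intro frontier reach hrnd hst hsound hsub hfr hproc hfuel
    match frontier with
    | [] =>
      refine ⟨hst, hsound, ?_⟩
      intro a ha x he
      rcases hproc a ha with h | h
      · cases h
      · exact h x he
    | A :: fr =>
      simp only [pvBfs]
      obtain ⟨m, nod, k, c, p5, q6, s7⟩ := pvEvC_round (pvAdj d) (A :: fr) reach
      apply ih
      · exact nod hrnd
      · exact m hst
      · intro y hy
        rcases s7 y hy with h | ⟨a, ha, hya⟩
        · exact hsound y h
        · exact Relation.ReflTransGen.tail (hsound a (hfr a ha))
            ((pvAdj_mem d hnd a y).1 hya)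
      · intro y hy
        rcases s7 y hy with h | ⟨a, ha, hya⟩
        · exact hsub y h
        · exact Or.inr ((pvAdj_mem d hnd a y).1 hya).1
      · intro y hy
        rcases p5 y hy with h | h
        · cases h
        · exact h
      · intro a ha
        rcases q6 a ha with h | h
        · rcases hproc a h with h' | h'
          · right
            intro x he
            exact pvRound_complete (pvAdj d) (A :: fr) reach a x h'
              ((pvAdj_mem d hnd a x).2 he)
          · right
            intro x he
            exact m (h' x he)
        · exact Or.inl h
      · intro hne
        have h2 := hfuel (by simp)
        have h3 : 1 ≤ (pvRound (pvAdj d) (A :: fr) reach).2.length :=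
          List.length_pos_of_ne_nil hne
        simp only [List.length_nil] at c
        omega

theorem pvInit_singleton (start : String) :
    PySem.Set.add PySem.Set.empty start = [start] := rfl

theorem pvLoopA_result_good (d : PySem.Dict String (List (List String))) (start : String) :
    pvGood d start (pvLoopA d (d.size + 2) (PySem.Set.add PySem.Set.empty start)) := by
  rw [pvInit_singleton]
  apply pvLoopA_good d start (d.size + 2) [start]
  · simp
  · simp
  · intro x hx
    rw [List.mem_singleton.1 hx]
    exact Relation.ReflTransGen.refl
  · intro x hx
    exact Or.inl (List.mem_singleton.1 hx)
  · simp

theorem pvBfs_result_good (d : PySem.Dict String (List (List String))) (start : String)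
    (hnd : d.keys.Nodup) :
    pvGood d start (pvBfs (pvAdj d) (d.size + 2) [start] (PySem.Set.add PySem.Set.empty start)) := by
  rw [pvInit_singleton]
  apply pvBfs_good d start hnd (d.size + 2) [start] [start]
  · simp
  · simp
  · intro x hx
    rw [List.mem_singleton.1 hx]
    exact Relation.ReflTransGen.refl
  · intro x hx
    exact Or.inl (List.mem_singleton.1 hx)
  · intro y hy
    exact hy
  · intro a ha
    exact Or.inl ha
  · intro _; simp

theorem remove_unreachable_spec : Claim_equal_remove_unreachable := by
  intro start rules _
  unfold Spec_remove_unreachable remove_unreachable remove_unreachable_alt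
  set d := PySem.Dict.ofList rules
  have hnd : d.keys.Nodup := PySem.Dict.nodup_keys_ofList rules
  have hiff := pvGood_mem_iff d start _ _ (pvLoopA_result_good d start)
    (pvBfs_result_good d start hnd)
  show (d.items.filter
      (fun p => (pvLoopA d (d.size + 2) (PySem.Set.add PySem.Set.empty start)).contains p.1)).map
        (fun p => (p.1, PySem.Set.ofList p.2)) =
    (d.items.filter
      (fun p => (pvBfs (pvAdj d) (d.size + 2) [start] (PySem.Set.add PySem.Set.empty start)).contains p.1)).map
        (fun p => (p.1, PySem.Set.ofList p.2))
  congr 1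
  apply List.filter_congr
  intro p _
  rw [PySem.Set.contains_eq_decide, PySem.Set.contains_eq_decide]
  exact decide_eq_decide.2 (hiff p.1)
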